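-- pv_equiv track=rewrite | github.com/hiyamdebary/interferometry_aperture_configuration | aperture_configuration.py | davies_configuration_2
-- ===== SOURCE A (Python) =====
-- def davies_configuration_2(m):
--     lenslet_configurations = []
--     offset_start = 1
--     offset_convention = +1
--     def add_line(davies_baseline, offset_start):
--         A = offset_start
--         B = offset_start + davies_baseline + offset_convention
--         lenslet_configurations.append((A, B))
--         offset_start += 1
--         return offset_start
--     for j in range(m-1):
--         offset_start = add_line(4*m-4 - 2*j, offset_start)
--     offset_start = add_line(4*m-2, offset_start)
--     for j in range(m-1):
--         offset_start = add_line(2*m-3 - 2*j, offset_start)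
--     offset_start = add_line(4*m-1, offset_start)
--     offset_start += m-1
--     offset_start += m-1
--     offset_start = add_line(2*m-1, offset_start)
--     for j in range(m-1):
--         offset_start = add_line(4*m-3 - 2*j, offset_start)
--     offset_start += 1
--     for j in range(m-1):
--         offset_start = add_line(2*m-2 - 2*j, offset_start)
--     offset_start += m-1
--     offset_start += m-1
--     offset_start += 1
--     offset_start += 1
--     return lenslet_configurations
-- ===== SOURCE B (Python) =====
-- # B: direct construction — build baselines and offset values in emission order, then zip.
-- def davies_configuration_2(m):
--     baselines = (
--         [4*m-4 - 2*j for j in range(m-1)]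
--         + [4*m-2]
--         + [2*m-3 - 2*j for j in range(m-1)]
--         + [4*m-1, 2*m-1]
--         + [4*m-3 - 2*j for j in range(m-1)]
--         + [2*m-2 - 2*j for j in range(m-1)]
--     )
--     offsets = (
--         list(range(1, 2*m+1))
--         + [4*m-1]
--         + list(range(4*m, 5*m-1))
--         + list(range(5*m, 6*m-1))
--     )
--     return [(a, a + b + 1) for a, b in zip(offsets, baselines)]
-- ===== Notes on version B (the rewrite author's own statement) =====
-- stated objective: simpler
-- what changed: Replaces the threaded offset_start accumulator and add_line helper with a direct construction: the ordered list of baselines and the ordered list of first coordinates (runs 1..2m, the jump to 4m-1, runs 4m..5m-2 and 5m..6m-2) are built independently and zipped into (A, A+baseline+1). Pre_ restricts to the natural aperture domain m >= 1; for m <= 0 A's loops are empty and its three leftover tuples are accidental, so those inputs are excluded.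
-- outside the precondition, e.g. on davies_configuration_2(0): A returns [(1, 0), (2, 2), (1, 1)], B returns [(-1, -2)]; on davies_configuration_2(-2): A returns [(1, -8), (2, -6), (-3, -7)], B returns [(-9, -18)]
import Mathlib
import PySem

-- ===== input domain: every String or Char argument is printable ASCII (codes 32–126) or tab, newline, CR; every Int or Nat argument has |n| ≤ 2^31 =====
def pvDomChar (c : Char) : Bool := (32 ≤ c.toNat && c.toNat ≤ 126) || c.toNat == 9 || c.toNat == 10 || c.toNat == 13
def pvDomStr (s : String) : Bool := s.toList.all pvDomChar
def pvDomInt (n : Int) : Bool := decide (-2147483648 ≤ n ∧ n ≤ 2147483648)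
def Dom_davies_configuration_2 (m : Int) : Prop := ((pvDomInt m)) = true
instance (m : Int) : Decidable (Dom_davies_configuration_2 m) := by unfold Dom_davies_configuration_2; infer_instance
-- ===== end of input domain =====

-- B replaces A's threaded offset_start accumulator and add_line helper by a direct construction:
-- the baseline list and the list of first coordinates are built independently and zipped
-- (same cost; objective: simpler decomposition).

-- ===== PORT A =====
-- add_line closure of A; offset_convention = +1 is a constant in A, inlined here.
def davies_addLine (cfg : List (Int × Int)) (davies_baseline offset_start : Int) :
    List (Int × Int) × Int :=
  let A := offset_start
  let B := offset_start + davies_baseline + 1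
  (cfg ++ [(A, B)], offset_start + 1)

def davies_configuration_2 (m : Int) : List (Int × Int) :=
  let st0 : List (Int × Int) × Int := ([], 1)
  let st1 := (PySem.List.pyRange 0 (m-1) 1).foldl
      (fun st j => davies_addLine st.1 (4*m-4 - 2*j) st.2) st0
  let st2 := davies_addLine st1.1 (4*m-2) st1.2
  let st3 := (PySem.List.pyRange 0 (m-1) 1).foldl
      (fun st j => davies_addLine st.1 (2*m-3 - 2*j) st.2) st2
  let st4 := davies_addLine st3.1 (4*m-1) st3.2
  let st4' := (st4.1, st4.2 + (m-1) + (m-1))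
  let st5 := davies_addLine st4'.1 (2*m-1) st4'.2
  let st6 := (PySem.List.pyRange 0 (m-1) 1).foldl
      (fun st j => davies_addLine st.1 (4*m-3 - 2*j) st.2) st5
  let st6' := (st6.1, st6.2 + 1)
  let st7 := (PySem.List.pyRange 0 (m-1) 1).foldl
      (fun st j => davies_addLine st.1 (2*m-2 - 2*j) st.2) st6'
  st7.1

-- ===== PORT B =====
def davies_configuration_2_alt (m : Int) : List (Int × Int) :=
  let baselines :=
    (PySem.List.pyRange 0 (m-1) 1).map (fun j => 4*m-4 - 2*j)
    ++ [4*m-2]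
    ++ (PySem.List.pyRange 0 (m-1) 1).map (fun j => 2*m-3 - 2*j)
    ++ [4*m-1, 2*m-1]
    ++ (PySem.List.pyRange 0 (m-1) 1).map (fun j => 4*m-3 - 2*j)
    ++ (PySem.List.pyRange 0 (m-1) 1).map (fun j => 2*m-2 - 2*j)
  let offsets :=
    PySem.List.pyRange 1 (2*m+1) 1
    ++ [4*m-1]
    ++ PySem.List.pyRange (4*m) (5*m-1) 1
    ++ PySem.List.pyRange (5*m) (6*m-1) 1
  (offsets.zip baselines).map (fun p => (p.1, p.1 + p.2 + 1))

-- ===== PRECONDITION & SPEC =====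
-- Pre_ restricts to the natural aperture domain m ≥ 1: for m ≤ 0 A's loops are empty and its
-- three leftover tuples are an artefact of the empty loops, so those inputs are excluded.
def Pre_davies_configuration_2 (m : Int) : Prop := 1 ≤ m
instance (m : Int) : Decidable (Pre_davies_configuration_2 m) := by
  unfold Pre_davies_configuration_2; infer_instance
def pvWitness_davies_configuration_2 : Int := 3

def Spec_davies_configuration_2 (m : Int) (out : List (Int × Int)) : Prop :=
  out = davies_configuration_2_alt m
instance (m : Int) (out : List (Int × Int)) : Decidable (Spec_davies_configuration_2 m out) := by
  unfold Spec_davies_configuration_2; infer_instance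

-- ===== CLAIM (what is proved, stated in full; the proofs are below) =====
def Claim_equal_davies_configuration_2 : Prop :=
  ∀ (m : Int), Dom_davies_configuration_2 m → Pre_davies_configuration_2 m →
    Spec_davies_configuration_2 m (davies_configuration_2 m)

-- ===== LEMMAS AND PROOFS =====

-- A fold of add_line over range a..a+n starting in state st appends, for the i-th range
-- element j, the tuple (st.2+i, st.2+i + f j + 1), and ends with offset st.2 + n.
lemma foldl_addLine (f : Int → Int) :
    ∀ (n : Nat) (a : Int) (st : List (Int × Int) × Int),
    (PySem.List.pyRange a (a + n) 1).foldl
        (fun s j => davies_addLine s.1 (f j) s.2) st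
    = (st.1 ++ ((PySem.List.pyRange st.2 (st.2 + n) 1).zip
          ((PySem.List.pyRange a (a + n) 1).map f)).map (fun p => (p.1, p.1 + p.2 + 1)),
       st.2 + n) := by
  intro n
  induction n with
  | zero =>
    intro a st
    simp
  | succ k ih =>
    intro a st
    obtain ⟨cfg, o⟩ := st
    have ha : a + ((k+1 : Nat) : Int) = (a+1) + (k : Nat) := by push_cast; ring
    have ho : o + ((k+1 : Nat) : Int) = (o+1) + (k : Nat) := by push_cast; ring
    simp only
    rw [ha, ho]
    rw [PySem.List.pyRange_one_cons (show a < (a+1) + ((k:Nat):Int) by omega),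
        PySem.List.pyRange_one_cons (show o < (o+1) + ((k:Nat):Int) by omega)]
    simp only [List.foldl_cons, List.map_cons, List.zip_cons_cons]
    rw [show (davies_addLine cfg (f a) o) = (cfg ++ [(o, o + f a + 1)], o + 1) from rfl]
    rw [ih (a+1) (cfg ++ [(o, o + f a + 1)], o + 1)]
    simp [List.append_assoc]

-- canonical chunk: offsets o..o+k zipped with baselines f j for j in 0..k
def pvZ (k : Nat) (o : Int) (f : Int → Int) : List (Int × Int) :=
  ((PySem.List.pyRange o (o + (k:Int)) 1).zip
    ((PySem.List.pyRange 0 (0 + (k:Int)) 1).map f)).map (fun p => (p.1, p.1 + p.2 + 1))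

-- canonical value of both programs at m = k+1
def pvCanon (k : Nat) : List (Int × Int) :=
  pvZ k 1 (fun j => 4*((k:Int)+1)-4 - 2*j)
  ++ [(1 + (k:Int), (1 + (k:Int)) + (4*((k:Int)+1)-2) + 1)]
  ++ pvZ k ((1 + (k:Int)) + 1) (fun j => 2*((k:Int)+1)-3 - 2*j)
  ++ [(((1 + (k:Int)) + 1) + (k:Int),
       (((1 + (k:Int)) + 1) + (k:Int)) + (4*((k:Int)+1)-1) + 1)]
  ++ [(4*((k:Int)+1)-1, (4*((k:Int)+1)-1) + (2*((k:Int)+1)-1) + 1)]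
  ++ pvZ k (4*((k:Int)+1)) (fun j => 4*((k:Int)+1)-3 - 2*j)
  ++ pvZ k (5*((k:Int)+1)) (fun j => 2*((k:Int)+1)-2 - 2*j)

lemma portA_eq_canon (k : Nat) : davies_configuration_2 ((k:Int)+1) = pvCanon k := by
  simp only [davies_configuration_2]
  rw [show ((k:Int)+1) - 1 = 0 + (k:Int) from by ring]
  rw [show (0:Int) + (k:Int) = 0 + ((k:Nat):Int) from rfl]
  rw [foldl_addLine, foldl_addLine, foldl_addLine, foldl_addLine]
  simp only [pvCanon, pvZ, davies_addLine, List.append_assoc, List.nil_append]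
  ring_nf
lemma portB_eq_canon (k : Nat) : davies_configuration_2_alt ((k:Int)+1) = pvCanon k := by
  simp only [davies_configuration_2_alt]
  rw [show ((k:Int)+1) - 1 = 0 + (k:Int) from by ring]
  rw [show 2*((k:Int)+1)+1 = (((1 + (k:Int)) + 1) + (k:Int)) + 1 from by ring]
  rw [show 5*((k:Int)+1)-1 = 4*((k:Int)+1) + (k:Int) from by ring]
  rw [show 6*((k:Int)+1)-1 = 5*((k:Int)+1) + (k:Int) from by ring]
  rw [PySem.List.pyRange_one_append 1 (1+(k:Int)) ((((1+(k:Int))+1)+(k:Int))+1)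
        (by omega) (by omega)]
  rw [PySem.List.pyRange_one_append (1+(k:Int)) ((1+(k:Int))+1) ((((1+(k:Int))+1)+(k:Int))+1)
        (by omega) (by omega)]
  rw [PySem.List.pyRange_one_append ((1+(k:Int))+1) (((1+(k:Int))+1)+(k:Int))
        ((((1+(k:Int))+1)+(k:Int))+1) (by omega) (by omega)]
  rw [PySem.List.pyRange_one_singleton, PySem.List.pyRange_one_singleton]
  rw [show ([4*((k:Int)+1)-1, 2*((k:Int)+1)-1] : List Int)
        = [4*((k:Int)+1)-1] ++ [2*((k:Int)+1)-1] from rfl]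
  simp only [List.append_assoc]
  rw [List.zip_append (by
        simp only [PySem.List.length_pyRange_one, List.length_map]; omega)]
  rw [List.zip_append (by simp only [List.length_cons, List.length_nil])]
  rw [List.zip_append (by
        simp only [PySem.List.length_pyRange_one, List.length_map]; omega)]
  rw [List.zip_append (by simp only [List.length_cons, List.length_nil])]
  rw [List.zip_append (by simp only [List.length_cons, List.length_nil])]
  rw [List.zip_append (by
        simp only [PySem.List.length_pyRange_one, List.length_map]; omega)]
  simp only [List.map_append, List.zip_cons_cons, List.zip_nil_right,
    List.map_cons, List.map_nil]
  simp only [pvCanon, pvZ, List.append_assoc]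

-- ===== VERDICT (by name: the statement is the Claim_ definition above) =====
theorem davies_configuration_2_spec : Claim_equal_davies_configuration_2 := by
  intro m _ hm
  have h1 : 1 ≤ m := hm
  unfold Spec_davies_configuration_2
  obtain ⟨k, rfl⟩ : ∃ k : Nat, m = (k:Int)+1 := ⟨(m-1).toNat, by omega⟩
  rw [portA_eq_canon, portB_eq_canon]
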